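-- pv_equiv track=rewrite | github.com/konos93/DocLayout-YOLO | demo_keep.py | parse_keep_classes
-- ===== SOURCE A (Python) =====
-- def normalize(s: str) -> str:
--     return s.strip().lower().replace("-", "_").replace(" ", "_")
--
-- ALIASES = {
--     "text": "plain_text",
--     "plain text": "plain_text",
--     "plain-text": "plain_text",
--     "figure-caption": "figure_caption",
--     "table-caption": "table_caption",
--     "table-footnote": "table_footnote",
--     "formula-caption": "formula_caption",
--     "isolated_formula": "isolate_formula",
--     "isolated-formula": "isolate_formula",
--     "isolated formula": "isolate_formula",
-- }
--
-- def map_alias(token: str) -> str: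
--     t = token.strip().lower()
--     return ALIASES.get(t, token)
--
-- def parse_keep_classes(names_dict, keep_arg: str):
--     # names_dict: id -> class name
--     norm_model = {k: normalize(v) for k, v in names_dict.items()}
--     inv = {}
--     for k, v in norm_model.items():
--         inv.setdefault(v, []).append(k)
--
--     tokens = [t for t in keep_arg.split(",") if t.strip()]
--     ids, missing = [], []
--     for raw in tokens:
--         aliased = map_alias(raw)
--         key = normalize(aliased)
--         if key in inv:
--             ids.extend(inv[key])
--         else:
--             missing.append(raw.strip())
--
--     if missing:
--         raise SystemExit(
--             f"Requested classes not found: {missing}. "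
--             f"Available: {sorted(set(names_dict.values()))}"
--         )
--     return sorted(set(ids))
-- ===== SOURCE B (Python) =====
-- # B: no inverse index — per token, scan names_dict items directly for normalized matches.
-- def normalize(s: str) -> str:
--     return s.strip().lower().replace("-", "_").replace(" ", "_")
--
-- ALIASES = {
--     "text": "plain_text",
--     "plain text": "plain_text",
--     "plain-text": "plain_text",
--     "figure-caption": "figure_caption",
--     "table-caption": "table_caption",
--     "table-footnote": "table_footnote",
--     "formula-caption": "formula_caption",
--     "isolated_formula": "isolate_formula",
--     "isolated-formula": "isolate_formula",
--     "isolated formula": "isolate_formula",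
-- }
--
-- def map_alias(token: str) -> str:
--     t = token.strip().lower()
--     return ALIASES.get(t, token)
--
-- def parse_keep_classes(names_dict, keep_arg: str):
--     ids, missing = [], []
--     for raw in keep_arg.split(","):
--         if not raw.strip():
--             continue
--         key = normalize(map_alias(raw))
--         matches = [k for k, v in names_dict.items() if normalize(v) == key]
--         if matches:
--             ids.extend(matches)
--         else:
--             missing.append(raw.strip())
--     if missing:
--         raise SystemExit(
--             f"Requested classes not found: {missing}. "
--             f"Available: {sorted(set(names_dict.values()))}"
--         )
--     return sorted(set(ids))
-- ===== Notes on version B (the rewrite author's own statement) =====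
-- stated objective: simpler
-- what changed: B drops A's two dict-building passes (normalized model + inverse index) and instead, for each comma token, scans names_dict.items() directly collecting ids whose normalized value matches, with the same SystemExit and sorted(set(ids)) result.
import Mathlib
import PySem

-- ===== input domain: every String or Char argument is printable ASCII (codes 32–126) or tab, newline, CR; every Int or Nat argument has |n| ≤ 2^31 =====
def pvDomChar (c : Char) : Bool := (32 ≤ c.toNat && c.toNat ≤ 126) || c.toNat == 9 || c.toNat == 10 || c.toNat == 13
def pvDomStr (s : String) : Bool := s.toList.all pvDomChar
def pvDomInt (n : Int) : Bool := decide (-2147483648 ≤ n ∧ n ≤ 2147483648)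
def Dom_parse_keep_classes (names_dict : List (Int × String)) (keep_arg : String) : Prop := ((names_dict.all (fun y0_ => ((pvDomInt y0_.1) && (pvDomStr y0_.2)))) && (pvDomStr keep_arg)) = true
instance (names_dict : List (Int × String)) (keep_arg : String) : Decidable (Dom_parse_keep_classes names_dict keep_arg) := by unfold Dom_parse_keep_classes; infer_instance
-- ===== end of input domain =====

-- B drops A's inverse-index build and scans names_dict directly per token (objective: simpler).
-- Python A/B raise SystemExit when a token hits nothing; exactly those inputs are outside Pre_.

-- ===== PORT A =====
-- helper normalize: s.strip().lower().replace("-", "_").replace(" ", "_")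
def pvNormalize (s : String) : String :=
  PySem.Str.replace (PySem.Str.replace (PySem.Str.lower (PySem.Str.strip s)) "-" "_") " " "_"

-- module constant ALIASES (a Python dict)
def pvAliases : PySem.Dict String String := PySem.Dict.ofList
  [("text", "plain_text"), ("plain text", "plain_text"), ("plain-text", "plain_text"),
   ("figure-caption", "figure_caption"), ("table-caption", "table_caption"),
   ("table-footnote", "table_footnote"), ("formula-caption", "formula_caption"),
   ("isolated_formula", "isolate_formula"), ("isolated-formula", "isolate_formula"),
   ("isolated formula", "isolate_formula")]

-- helper map_alias: ALIASES.get(token.strip().lower(), token)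
def pvMapAlias (token : String) : String :=
  pvAliases.getD (PySem.Str.lower (PySem.Str.strip token)) token

-- port of A; the names_dict parameter (a Python dict) is read through PySem.Dict.ofList.
-- inv.setdefault(v, []).append(k) is ported as modify v [] (· ++ [k]) (same dict semantics).
-- keep_arg.split(",") : split? is `some` since "," ≠ "". The SystemExit branch (missing ≠ [])
-- is excluded by Pre_; the port then returns the normal branch's value.
def parse_keep_classes (names_dict : List (Int × String)) (keep_arg : String) : List Int :=
  let d := PySem.Dict.ofList names_dict
  let norm_model := d.items.foldl (fun m p => m.insert p.1 (pvNormalize p.2)) PySem.Dict.empty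
  let inv := norm_model.items.foldl (fun iv p => iv.modify p.2 [] (fun l => l ++ [p.1]))
      (PySem.Dict.empty : PySem.Dict String (List Int))
  let tokens := ((PySem.Str.split? keep_arg ",").getD []).filter (fun t => PySem.Str.strip t != "")
  let st := tokens.foldl (fun acc raw =>
      let key := pvNormalize (pvMapAlias raw)
      if inv.contains key then (acc.1 ++ inv.getD key [], acc.2)
      else (acc.1, acc.2 ++ [PySem.Str.strip raw])) (([], []) : List Int × List String)
  PySem.List.sorted (PySem.Set.ofList st.1) (fun x => x)

-- ===== PORT B =====
-- port of Source B: one loop over the raw comma tokens, scanning names_dict's items per token.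
def parse_keep_classes_alt (names_dict : List (Int × String)) (keep_arg : String) : List Int :=
  let d := PySem.Dict.ofList names_dict
  let st := ((PySem.Str.split? keep_arg ",").getD []).foldl (fun acc raw =>
      if PySem.Str.strip raw == "" then acc
      else
        let key := pvNormalize (pvMapAlias raw)
        let hits := (d.items.filter (fun p => pvNormalize p.2 == key)).map (·.1)
        if hits.isEmpty then (acc.1, acc.2 ++ [PySem.Str.strip raw])
        else (acc.1 ++ hits, acc.2)) (([], []) : List Int × List String)
  PySem.List.sorted (PySem.Set.ofList st.1) (fun x => x)

-- ===== PRECONDITION & SPEC =====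
-- Pre_ excludes exactly the inputs where A raises SystemExit: some non-blank comma token whose
-- aliased, normalized form hits no normalized class name of the dict.
def Pre_parse_keep_classes (names_dict : List (Int × String)) (keep_arg : String) : Prop :=
  ∀ t ∈ (PySem.Str.split? keep_arg ",").getD [], PySem.Str.strip t ≠ "" →
    ∃ p ∈ (PySem.Dict.ofList names_dict).items, pvNormalize p.2 = pvNormalize (pvMapAlias t)
instance (names_dict : List (Int × String)) (keep_arg : String) : Decidable (Pre_parse_keep_classes names_dict keep_arg) := by unfold Pre_parse_keep_classes; infer_instance

def pvWitness_parse_keep_classes : (List (Int × String)) × String :=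
  ([(0, "x")], "x")

def Spec_parse_keep_classes (names_dict : List (Int × String)) (keep_arg : String) (out : List Int) : Prop := out = parse_keep_classes_alt names_dict keep_arg
instance (names_dict : List (Int × String)) (keep_arg : String) (out : List Int) : Decidable (Spec_parse_keep_classes names_dict keep_arg out) := by unfold Spec_parse_keep_classes; infer_instance

-- ===== CLAIM (what is proved, stated in full; the proofs are below) =====
def Claim_equal_parse_keep_classes : Prop := ∀ (names_dict : List (Int × String)) (keep_arg : String), Dom_parse_keep_classes names_dict keep_arg → Pre_parse_keep_classes names_dict keep_arg → Spec_parse_keep_classes names_dict keep_arg (parse_keep_classes names_dict keep_arg)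

-- ===== LEMMAS AND PROOFS =====

-- A's norm_model has the same items as names_dict's dict, values normalized.
theorem pv_norm_model_items (names_dict : List (Int × String)) :
    ((PySem.Dict.ofList names_dict).items.foldl
        (fun m p => m.insert p.1 (pvNormalize p.2)) PySem.Dict.empty).items
      = (PySem.Dict.ofList names_dict).items.map (fun p => (p.1, pvNormalize p.2)) := by
  have h := PySem.Dict.items_foldl_insert_fresh (PySem.Dict.ofList names_dict).items
      (fun p => p.1) (fun p => pvNormalize p.2) (PySem.Dict.empty : PySem.Dict Int String)
      (by intro a _; exact PySem.Dict.contains_empty _)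
      (by simpa [PySem.Dict.keys] using PySem.Dict.nodup_keys_ofList names_dict)
  simpa [PySem.Dict.items] using h

-- inv's lookup at key is exactly B's scan of the dict's items.
theorem pv_inv_getD (names_dict : List (Int × String)) (key : String) :
    (((PySem.Dict.ofList names_dict).items.foldl
        (fun m p => m.insert p.1 (pvNormalize p.2)) PySem.Dict.empty).items.foldl
          (fun iv p => iv.modify p.2 [] (fun l => l ++ [p.1]))
          (PySem.Dict.empty : PySem.Dict String (List Int))).getD key []
      = ((PySem.Dict.ofList names_dict).items.filter
          (fun p => pvNormalize p.2 == key)).map (·.1) := by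
  rw [pv_norm_model_items]
  rw [show ((PySem.Dict.ofList names_dict).items.map (fun p => (p.1, pvNormalize p.2))).foldl
        (fun iv p => iv.modify p.2 [] (fun l => l ++ [p.1]))
        (PySem.Dict.empty : PySem.Dict String (List Int))
      = ((PySem.Dict.ofList names_dict).items.map
          (fun p => (pvNormalize p.2, p.1))).foldl
        (fun iv p => iv.modify p.1 [] (fun l => l ++ [p.2]))
        (PySem.Dict.empty : PySem.Dict String (List Int)) by
    simp [List.foldl_map]]
  rw [PySem.Dict.getD_foldl_modify_append]
  simp [List.filter_map, List.map_map, Function.comp_def]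

-- inv contains key iff B's scan finds something.
theorem pv_inv_contains (names_dict : List (Int × String)) (key : String) :
    (((PySem.Dict.ofList names_dict).items.foldl
        (fun m p => m.insert p.1 (pvNormalize p.2)) PySem.Dict.empty).items.foldl
          (fun iv p => iv.modify p.2 [] (fun l => l ++ [p.1]))
          (PySem.Dict.empty : PySem.Dict String (List Int))).contains key = true
      ↔ ∃ p ∈ (PySem.Dict.ofList names_dict).items, pvNormalize p.2 = key := by
  rw [PySem.Dict.contains_iff_mem_keys]
  have hkeys := PySem.Dict.keys_foldl_modify_key
      ((PySem.Dict.ofList names_dict).items.foldl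
        (fun m p => m.insert p.1 (pvNormalize p.2)) PySem.Dict.empty).items
      (fun p => p.2) [] (fun _ p l => l ++ [p.1])
      (PySem.Dict.empty : PySem.Dict String (List Int))
  simp only at hkeys
  rw [hkeys]
  rw [pv_norm_model_items]
  constructor
  · intro h
    rcases (PySem.Set.mem_update _ _ _).1 h with h | h
    · simp [PySem.Dict.keys_empty] at h
    · simp only [List.map_map, List.mem_map, Function.comp_def] at h
      rcases h with ⟨p, hp, hk⟩
      exact ⟨p, hp, hk⟩
  · rintro ⟨p, hp, hk⟩
    refine (PySem.Set.mem_update _ _ _).2 (Or.inr ?_)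
    simp only [List.map_map, List.mem_map, Function.comp_def]
    exact ⟨p, hp, hk⟩

-- folding over a filtered list = folding over the list, skipping the filtered-out elements
theorem pv_foldl_filter {α β : Type} (l : List α) (p : α → Bool) (f : β → α → β) (b : β) :
    (l.filter p).foldl f b = l.foldl (fun acc x => if p x then f acc x else acc) b := by
  induction l generalizing b with
  | nil => rfl
  | cons x xs ih =>
    by_cases h : p x = true <;> simp [h, ih]

-- ===== VERDICT (by name: the statement is the Claim_ definition above) =====
theorem parse_keep_classes_spec : Claim_equal_parse_keep_classes := by
  intro names_dict keep_arg _hDom _hPre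
  unfold Spec_parse_keep_classes parse_keep_classes parse_keep_classes_alt
  simp only [pv_foldl_filter]
  congr 2
  apply congrArg Prod.fst
  apply List.foldl_ext
  intro acc raw _
  by_cases hs : PySem.Str.strip raw = ""
  · simp [hs]
  · have hs' : (PySem.Str.strip raw == "") = false := by simp [hs]
    simp only [hs', bne_iff_ne, ne_eq, hs, not_false_eq_true, if_true]
    set key := pvNormalize (pvMapAlias raw) with hkey
    by_cases hc : ∃ p ∈ (PySem.Dict.ofList names_dict).items, pvNormalize p.2 = key
    · have hct := (pv_inv_contains names_dict key).2 hc
      have hm : (((PySem.Dict.ofList names_dict).items.filter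
          (fun p => pvNormalize p.2 == key)).map (·.1)).isEmpty = false := by
        rcases hc with ⟨p, hp, hk⟩
        simp only [List.isEmpty_eq_false_iff, ne_eq, List.map_eq_nil_iff,
          List.filter_eq_nil_iff, not_forall]
        exact ⟨p, hp, by simp [hk]⟩
      simp [hct, hm, pv_inv_getD]
    · have hct : (((PySem.Dict.ofList names_dict).items.foldl
          (fun m p => m.insert p.1 (pvNormalize p.2)) PySem.Dict.empty).items.foldl
            (fun iv p => iv.modify p.2 [] (fun l => l ++ [p.1]))
            (PySem.Dict.empty : PySem.Dict String (List Int))).contains key = false := by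
        by_contra h
        exact hc ((pv_inv_contains names_dict key).1 (by simpa using h))
      have hm : (((PySem.Dict.ofList names_dict).items.filter
          (fun p => pvNormalize p.2 == key)).map (·.1)).isEmpty = true := by
        simp only [List.isEmpty_iff, List.map_eq_nil_iff, List.filter_eq_nil_iff]
        intro p hp
        simp only [beq_iff_eq]
        exact fun hk => hc ⟨p, hp, hk⟩
      simp [hct, hm]
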